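-- pv_equiv track=rewrite | github.com/parallel-p/please | problems_on_please/CpyAug2012/contests/day08/maxcomsubstr2/solutions/solution_dk_dummy.py | Solve
-- ===== SOURCE A (Python) =====
-- def Solve(L, A, B):
--     Hashes = set()
--     for i in range(L, len(A) + 1):
--         Hashes.add(A[i - L:i])
--     for i in range(L, len(B) + 1):
--         if B[i - L:i] in Hashes:
--             return True
--     return False
-- ===== SOURCE B (Python) =====
-- def Solve(L, A, B):
--     windows = {B[i:i+L] for i in range(len(B) - L + 1)}
--     return any(w in A for w in windows)
-- ===== Notes on version B (the rewrite author's own statement) =====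
-- stated objective: alternative
-- what changed: Instead of materialising a hash set of every length-L window of A and probing it with each window of B, B collects the distinct length-L windows of B and asks directly whether each occurs in A via the built-in substring search, so no pass over A's windows exists.
import Mathlib
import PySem

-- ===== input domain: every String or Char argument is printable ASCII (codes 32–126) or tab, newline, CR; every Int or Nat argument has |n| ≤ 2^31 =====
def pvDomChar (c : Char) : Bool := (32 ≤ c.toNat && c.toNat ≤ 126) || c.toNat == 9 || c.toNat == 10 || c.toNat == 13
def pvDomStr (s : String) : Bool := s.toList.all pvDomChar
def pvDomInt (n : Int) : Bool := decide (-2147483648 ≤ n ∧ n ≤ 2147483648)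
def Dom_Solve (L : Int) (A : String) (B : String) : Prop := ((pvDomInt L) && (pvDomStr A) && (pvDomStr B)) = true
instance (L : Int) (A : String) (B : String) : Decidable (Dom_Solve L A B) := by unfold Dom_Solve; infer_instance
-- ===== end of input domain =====

-- B replaces A's hash set of A-windows probed by B-windows with a direct substring
-- test of each distinct length-L window of B against A (alternative structure).

-- ===== PORT A =====
def Solve (L : Int) (A : String) (B : String) : Bool :=
  let hashes : PySem.Set String :=
    (PySem.List.pyRange L (PySem.Str.len A + 1) 1).foldl
      (fun s i => PySem.Set.add s (PySem.Str.slice A (some (i - L)) (some i)))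
      PySem.Set.empty
  (PySem.List.pyRange L (PySem.Str.len B + 1) 1).any
    (fun i => PySem.Set.contains hashes (PySem.Str.slice B (some (i - L)) (some i)))

-- ===== PORT B =====
def Solve_alt (L : Int) (A : String) (B : String) : Bool :=
  let windows : PySem.Set String :=
    PySem.Set.ofList ((PySem.List.pyRange 0 (PySem.Str.len B - L + 1) 1).map
      (fun i => PySem.Str.slice B (some i) (some (i + L))))
  windows.any (fun w => PySem.Str.isIn w A)

-- ===== PRECONDITION & SPEC =====
def Spec_Solve (L : Int) (A : String) (B : String) (out : Bool) : Prop := out = Solve_alt L A B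
instance (L : Int) (A : String) (B : String) (out : Bool) : Decidable (Spec_Solve L A B out) := by unfold Spec_Solve; infer_instance

-- ===== CLAIM (what is proved, stated in full; the proofs are below) =====
def Claim_equal_Solve : Prop := ∀ (L : Int) (A : String) (B : String), Dom_Solve L A B → Spec_Solve L A B (Solve L A B)

-- ===== LEMMAS AND PROOFS =====
lemma toList_str_slice (s : String) (a b : Option Int) : (PySem.Str.slice s a b).toList = PySem.List.slice s.toList a b := by simp [PySem.Str.slice]

lemma solve_iff (L : Int) (A B : String) :
  Solve L A B = true ↔ ∃ i : Int, (L ≤ i ∧ i < (B.toList.length:Int) + 1) ∧ ∃ j : Int, (L ≤ j ∧ j < (A.toList.length:Int)+1) ∧ PySem.List.slice A.toList (some (j-L)) (some j) = PySem.List.slice B.toList (some (i-L)) (some i) := by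
  unfold Solve
  rw [show (PySem.Set.empty : PySem.Set String) = ([] : PySem.Set String) from rfl,
      ← PySem.Set.update_map_eq_foldl_add, PySem.Set.update_nil_left]
  simp only [List.any_eq_true, PySem.Set.contains_iff, PySem.Set.mem_ofList, List.mem_map,
    PySem.List.mem_pyRange_one, PySem.Str.len_eq, ← String.toList_inj, toList_str_slice]

lemma alt_iff (L : Int) (A B : String) :
  Solve_alt L A B = true ↔ ∃ i : Int, (0 ≤ i ∧ i < (B.toList.length:Int) - L + 1) ∧ PySem.List.slice B.toList (some i) (some (i + L)) <:+: A.toList := by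
  unfold Solve_alt
  simp only [List.any_eq_true, PySem.Set.mem_ofList, List.mem_map,
    PySem.List.mem_pyRange_one, PySem.Str.isIn_iff_infix,
    PySem.Str.len_eq, toList_str_slice, exists_exists_and_eq_and]

lemma window_iff (a t : List Char) (l : Nat) :
    (∃ j : Nat, j + l ≤ a.length ∧ (a.drop j).take l = t) ↔ (t.length = l ∧ t <:+: a) := by
  constructor
  · rintro ⟨j, hj, rfl⟩
    refine ⟨?_, (List.take_prefix _ _).isInfix.trans (List.drop_suffix _ _).isInfix⟩
    simp only [List.length_take, List.length_drop]
    omega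
  · rintro ⟨hlen, s, u, rfl⟩
    refine ⟨s.length, ?_, ?_⟩
    · simp only [List.length_append]; omega
    · rw [List.append_assoc, List.drop_left, ← hlen, List.take_left]

lemma slice_empty_of_clamp (xs : List Char) (x y : Int)
    (h : PySem.List.clampIdx xs.length y ≤ PySem.List.clampIdx xs.length x) :
    PySem.List.slice xs (some x) (some y) = [] := by
  have hl := PySem.List.length_slice xs x y
  exact List.eq_nil_of_length_eq_zero (by omega)

lemma key (L : Int) (A B : String) : Solve L A B = Solve_alt L A B := by
  rw [Bool.eq_iff_iff, solve_iff, alt_iff]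
  by_cases hL : L ≤ 0
  · constructor
    · intro _
      refine ⟨(B.toList.length : Int), ⟨by positivity, by omega⟩, ?_⟩
      have h1 : PySem.List.clampIdx B.toList.length (B.toList.length + L) ≤ PySem.List.clampIdx B.toList.length (B.toList.length) := by
        simp only [PySem.List.clampIdx]; split_ifs <;> omega
      rw [slice_empty_of_clamp _ _ _ h1]
      exact List.nil_infix
    · intro _
      refine ⟨(B.toList.length : Int), ⟨by omega, by omega⟩,
              (A.toList.length : Int), ⟨by omega, by omega⟩, ?_⟩
      have h1 : PySem.List.clampIdx A.toList.length ((A.toList.length:Int)) ≤ PySem.List.clampIdx A.toList.length ((A.toList.length:Int) - L) := by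
        simp only [PySem.List.clampIdx]; split_ifs <;> omega
      have h2 : PySem.List.clampIdx B.toList.length ((B.toList.length:Int)) ≤ PySem.List.clampIdx B.toList.length ((B.toList.length:Int) - L) := by
        simp only [PySem.List.clampIdx]; split_ifs <;> omega
      rw [slice_empty_of_clamp _ _ _ h1, slice_empty_of_clamp _ _ _ h2]
  · rw [not_le] at hL
    lift L to ℕ using hL.le with l
    have hl : 0 < l := by exact_mod_cast hL
    constructor
    · rintro ⟨i, ⟨hi1, hi2⟩, j, ⟨hj1, hj2⟩, heq⟩
      obtain ⟨i', rfl⟩ : ∃ k : ℕ, i = (l : ℤ) + k := ⟨(i - l).toNat, by omega⟩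
      obtain ⟨j', rfl⟩ : ∃ k : ℕ, j = (l : ℤ) + k := ⟨(j - l).toNat, by omega⟩
      refine ⟨(i' : ℤ), ⟨by positivity, by omega⟩, ?_⟩
      have e1 : (l : ℤ) + i' - l = (i' : ℤ) := by ring
      have e2 : (l : ℤ) + j' - l = (j' : ℤ) := by ring
      rw [e1] at heq
      have e3 : (i' : ℤ) + l = ((i' + l : ℕ) : ℤ) := by push_cast; ring
      have e4 : (l : ℤ) + i' = ((i' + l : ℕ) : ℤ) := by push_cast; ring
      rw [e3, ← e4, ← heq, e2]
      have e5 : (l : ℤ) + j' = ((j' + l : ℕ) : ℤ) := by push_cast; ring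
      rw [e5, PySem.List.slice_natCast]
      have : j' + l - j' = l := by omega
      rw [this]
      exact (List.take_prefix _ _).isInfix.trans (List.drop_suffix _ _).isInfix
    · rintro ⟨i, ⟨hi1, hi2⟩, hinf⟩
      lift i to ℕ using hi1 with i'
      have hib : i' + l ≤ B.toList.length := by omega
      have e3 : (i' : ℤ) + l = ((i' + l : ℕ) : ℤ) := by push_cast; ring
      rw [e3, PySem.List.slice_natCast, show i' + l - i' = l from by omega] at hinf
      have hlen : ((B.toList.drop i').take l).length = l := by
        simp only [List.length_take, List.length_drop]; omega
      obtain ⟨j, hj, hwin⟩ := (window_iff A.toList _ l).mpr ⟨hlen, hinf⟩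
      refine ⟨((i' + l : ℕ) : ℤ), ⟨by omega, by push_cast; omega⟩,
              ((j + l : ℕ) : ℤ), ⟨by omega, by push_cast; omega⟩, ?_⟩
      rw [show ((i' + l : ℕ) : ℤ) - l = (i' : ℤ) from by push_cast; ring,
          show ((j + l : ℕ) : ℤ) - l = (j : ℤ) from by push_cast; ring,
          PySem.List.slice_natCast, PySem.List.slice_natCast,
          show i' + l - i' = l from by omega, show j + l - j = l from by omega, hwin]

-- ===== VERDICT (by name: the statement is the Claim_ definition above) =====
theorem Solve_spec : Claim_equal_Solve := by
  intro L A B _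
  show Solve L A B = Solve_alt L A B
  exact key L A B
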